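-- pv_equiv track=rewrite | github.com/thealper2/codewars-solutions | 7-kyu/boolean_trilogy_2_calculate_boolean_expression_easy.py | calculate
-- ===== SOURCE A (Python) =====
-- def calculate(expr: str, values: dict[str, int]) -> int:
--     substituted = []
--     i = 0
--     n = len(expr)
--     while i < n:
--         if expr[i] in values:
--             value = values[expr[i]]
--             substituted.append("True" if value else "False")
--             i += 1
--         else:
--             substituted.append(expr[i])
--             i += 1
--     substituted_expr = "".join(substituted)
--     tokens = substituted_expr.replace("&", " & ").replace("|", " | ").split()
--     i = 0
--     while i < len(tokens) - 2:
--         if tokens[i + 1] == "&":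
--             a = tokens[i] == "True"
--             b = tokens[i + 2] == "True"
--             result = a and b
--             tokens[i : i + 3] = ["True" if result else "False"]
--         else:
--             i += 1
--
--     i = 0
--     while i < len(tokens) - 2:
--         if tokens[i + 1] == "|":
--             a = tokens[i] == "True"
--             b = tokens[i + 2] == "True"
--             result = a or b
--             tokens[i : i + 3] = ["True" if result else "False"]
--         else:
--             i += 1
--
--     return tokens[0] == "True"
-- ===== SOURCE B (Python) =====
-- def calculate(expr: str, values: dict[str, int]) -> int:
--     substituted = "".join(
--         ("True" if values[c] else "False") if c in values else c for c in expr
--     )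
--     tokens = substituted.replace("&", " & ").replace("|", " | ").split()
--
--     def reduce_pass(toks, op, combine):
--         # one linear shift-reduce pass: collapse each complete (a, op, b) triple
--         # as soon as b arrives, left to right
--         st = []
--         for t in toks:
--             if len(st) >= 2 and st[-1] == op:
--                 a = st[-2] == "True"
--                 b = t == "True"
--                 st[-2:] = ["True" if combine(a, b) else "False"]
--             else:
--                 st.append(t)
--         return st
--
--     st = reduce_pass(tokens, "&", lambda a, b: a and b)
--     st = reduce_pass(st, "|", lambda a, b: a or b)
--     return st[0] == "True"
-- ===== Notes on version B (the rewrite author's own statement) =====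
-- stated objective: faster
-- what changed: A evaluates the token list by repeatedly splicing (a, op, b) triples back into the list (each splice re-copies the tail); B replaces both reduction loops by a single linear shift-reduce stack pass per operator, collapsing a triple as soon as its right operand arrives.
import Mathlib
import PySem

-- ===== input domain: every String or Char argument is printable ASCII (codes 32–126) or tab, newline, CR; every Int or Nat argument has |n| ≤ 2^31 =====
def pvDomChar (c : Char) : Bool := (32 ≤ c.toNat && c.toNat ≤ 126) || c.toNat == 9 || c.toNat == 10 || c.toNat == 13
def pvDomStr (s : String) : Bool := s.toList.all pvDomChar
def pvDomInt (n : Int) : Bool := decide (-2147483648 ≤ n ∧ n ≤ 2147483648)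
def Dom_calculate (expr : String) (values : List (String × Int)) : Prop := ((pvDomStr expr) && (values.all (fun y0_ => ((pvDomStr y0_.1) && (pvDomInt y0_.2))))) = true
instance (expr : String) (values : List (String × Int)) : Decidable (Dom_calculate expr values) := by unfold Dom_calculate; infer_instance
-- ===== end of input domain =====

-- B replaces A's quadratic reduce-by-list-splicing evaluation with two linear
-- shift-reduce stack passes (objective: faster, same return value).

-- "True" if b else "False"  (shared by both Pythons, token for a boolean)
def pvTok (b : Bool) : String := if b then "True" else "False"

-- shared per-character substitution: both Pythons compute
--   ("True" if values[c] else "False") if c in values else c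
def pvSubChar (d : PySem.Dict String Int) (c : Char) : String :=
  if d.contains (String.ofList [c]) then pvTok (d.getD (String.ofList [c]) 0 ≠ 0)
  else String.ofList [c]

-- ===== PORT A =====

-- A's first while loop: walk the characters, appending one piece per character
def pvSubstA (d : PySem.Dict String Int) : List Char → List String
  | [] => []
  | c :: cs => pvSubChar d c :: pvSubstA d cs

-- A's reduction loop (used once with "&"/and, once with "|"/or):
--   while i < len(tokens) - 2:
--     if tokens[i+1] == opTok: splice tokens[i:i+3] into one token
--     else: i += 1
def pvPassA (opTok : String) (opf : Bool → Bool → Bool) (tokens : List String) (i : Nat) : List String :=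
  if h : i + 2 < tokens.length then
    if tokens.getD (i + 1) "" = opTok then
      -- a = tokens[i] == "True"; b = tokens[i+2] == "True" (inlined)
      pvPassA opTok opf
        (tokens.take i ++ [pvTok (opf (tokens.getD i "" == "True") (tokens.getD (i + 2) "" == "True"))]
          ++ tokens.drop (i + 3)) i
    else
      pvPassA opTok opf tokens (i + 1)
  else tokens
termination_by tokens.length - i
decreasing_by
  · simp [List.length_take, List.length_drop]; omega
  · omega

def calculate (expr : String) (values : List (String × Int)) : Bool :=
  let d := PySem.Dict.mk values
  let substituted := pvSubstA d expr.toList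
  let substitutedExpr := PySem.Str.join "" substituted
  let tokens := PySem.Str.split₀ (PySem.Str.replace (PySem.Str.replace substitutedExpr "&" " & ") "|" " | ")
  let tokens := pvPassA "&" (fun a b => a && b) tokens 0
  let tokens := pvPassA "|" (fun a b => a || b) tokens 0
  tokens.getD 0 "" == "True"   -- tokens[0]; Pre_ excludes the empty-token inputs, where Python raises

-- ===== PORT B =====

-- B's single linear pass (stack kept top-first): push tokens, and whenever the
-- stack ends in (a, opTok) and t arrives, collapse to one boolean token
def pvStepB (opTok : String) (opf : Bool → Bool → Bool) (st : List String) (t : String) : List String :=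
  match st with
  | top :: a :: rest =>
      if top = opTok then pvTok (opf (a == "True") (t == "True")) :: rest
      else t :: top :: a :: rest
  | _ => t :: st

def pvPassB (opTok : String) (opf : Bool → Bool → Bool) (tokens : List String) : List String :=
  (tokens.foldl (pvStepB opTok opf) []).reverse

def calculate_alt (expr : String) (values : List (String × Int)) : Bool :=
  let d := PySem.Dict.mk values
  let substituted := PySem.Str.join "" (expr.toList.map (pvSubChar d))
  let tokens := PySem.Str.split₀ (PySem.Str.replace (PySem.Str.replace substituted "&" " & ") "|" " | ")
  let st := pvPassB "|" (fun a b => a || b) (pvPassB "&" (fun a b => a && b) tokens)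
  st.getD 0 "" == "True"   -- st[0]; Pre_ excludes the empty-token inputs, where Python raises

-- ===== PRECONDITION & SPEC =====
-- Pre_ excludes exactly the inputs where both Pythons raise IndexError (tokens[0] / st[0]
-- on an empty token list): every character of expr is whitespace and is not a key of values.
def Pre_calculate (expr : String) (values : List (String × Int)) : Prop :=
  ¬ (expr.toList.all (fun c =>
      PySem.Str.isspace c && !(PySem.Dict.mk values).contains (String.ofList [c])) = true)
instance (expr : String) (values : List (String × Int)) : Decidable (Pre_calculate expr values) := by unfold Pre_calculate; infer_instance

def pvWitness_calculate : String × (List (String × Int)) := ("x&y|x", [("x", 1), ("y", 0)])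

def Spec_calculate (expr : String) (values : List (String × Int)) (out : Bool) : Prop := out = calculate_alt expr values
instance (expr : String) (values : List (String × Int)) (out : Bool) : Decidable (Spec_calculate expr values out) := by unfold Spec_calculate; infer_instance

-- ===== CLAIM (what is proved, stated in full; the proofs are below) =====
def Claim_equal_calculate : Prop := ∀ (expr : String) (values : List (String × Int)), Dom_calculate expr values → Pre_calculate expr values → Spec_calculate expr values (calculate expr values)

-- ===== LEMMAS AND PROOFS =====

-- the common left-to-right reduction both passes compute
def pvRed (opTok : String) (opf : Bool → Bool → Bool) : List String → List String
  | [] => []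
  | [a] => [a]
  | [a, b] => [a, b]
  | a :: b :: c :: rest =>
      if b = opTok then pvRed opTok opf (pvTok (opf (a == "True") (c == "True")) :: rest)
      else a :: pvRed opTok opf (b :: c :: rest)
termination_by xs => xs.length
decreasing_by
  all_goals simp only [List.length_cons]
  all_goals omega

theorem pvRed_nil (opTok : String) (opf : Bool → Bool → Bool) : pvRed opTok opf [] = [] := by
  simp [pvRed]

theorem pvRed_single (opTok : String) (opf : Bool → Bool → Bool) (a : String) :
    pvRed opTok opf [a] = [a] := by
  simp [pvRed]

theorem pvRed_pair (opTok : String) (opf : Bool → Bool → Bool) (a b : String) :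
    pvRed opTok opf [a, b] = [a, b] := by
  simp [pvRed]

theorem pvRed_cons3 (opTok : String) (opf : Bool → Bool → Bool) (a b c : String) (rest : List String) :
    pvRed opTok opf (a :: b :: c :: rest) =
      if b = opTok then pvRed opTok opf (pvTok (opf (a == "True") (c == "True")) :: rest)
      else a :: pvRed opTok opf (b :: c :: rest) := by
  rw [pvRed]

-- "no complete triple of u has opTok in the middle"
def pvClean (opTok : String) (u : List String) : Prop :=
  ∀ j, j + 2 < u.length → u.getD (j + 1) "" ≠ opTok

theorem pvSubstA_eq_map (d : PySem.Dict String Int) (cs : List Char) :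
    pvSubstA d cs = cs.map (pvSubChar d) := by
  induction cs with
  | nil => rfl
  | cons c cs ih => simp [pvSubstA, ih]

theorem pvClean_short (opTok : String) (u : List String) (h : u.length ≤ 2) : pvClean opTok u := by
  intro j hj; omega

theorem pvClean_tail (opTok : String) (x : String) (u : List String)
    (h : pvClean opTok (x :: u)) : pvClean opTok u := by
  intro j hj
  have := h (j + 1) (by simp; omega)
  simpa using this

theorem pvRed_of_clean (opTok : String) (opf : Bool → Bool → Bool) :
    ∀ u, pvClean opTok u → pvRed opTok opf u = u := by
  intro u
  induction u with
  | nil => intro _; exact pvRed_nil _ _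
  | cons x u1 ih =>
    intro hc
    match u1 with
    | [] => exact pvRed_single _ _ _
    | [y] => exact pvRed_pair _ _ _ _
    | y :: z :: u2 =>
      have hy : y ≠ opTok := by
        have := hc 0 (by simp)
        simpa using this
      rw [pvRed_cons3]
      simp only [hy, if_false]
      rw [ih (pvClean_tail _ _ _ hc)]

theorem pvRed_junction (opTok : String) (opf : Bool → Bool → Bool)
    (hop : ∀ b, pvTok b ≠ opTok) :
    ∀ u a t ts, pvClean opTok (u ++ [a, opTok]) →
      pvRed opTok opf (u ++ a :: opTok :: t :: ts) =
      pvRed opTok opf (u ++ pvTok (opf (a == "True") (t == "True")) :: ts) := by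
  intro u
  induction u with
  | nil =>
    intro a t ts _
    rw [List.nil_append, List.nil_append]
    conv_lhs => rw [pvRed_cons3, if_pos rfl]
  | cons x u1 ih =>
    intro a t ts hc
    match u1 with
    | [] =>
      have ha : a ≠ opTok := by
        have := hc 0 (by simp)
        simpa using this
      simp only [List.cons_append, List.nil_append]
      conv_lhs => rw [pvRed_cons3, if_neg ha, pvRed_cons3, if_pos rfl]
      cases ts with
      | nil => simp [pvRed_single, pvRed_pair]
      | cons c ts2 =>
        conv_rhs => rw [pvRed_cons3, if_neg (hop _)]
    | y :: u2 =>
      have hy : y ≠ opTok := by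
        have := hc 0 (by simp)
        simpa using this
      have hih := ih a t ts (pvClean_tail _ _ _ hc)
      cases u2 with
      | nil =>
        simp only [List.cons_append, List.nil_append] at hih ⊢
        conv_lhs => rw [pvRed_cons3, if_neg hy, hih]
        conv_rhs => rw [pvRed_cons3, if_neg hy]
      | cons z u3 =>
        simp only [List.cons_append] at hih ⊢
        conv_lhs => rw [pvRed_cons3, if_neg hy, hih]
        conv_rhs => rw [pvRed_cons3, if_neg hy]

theorem pvPassA_eq_red (opTok : String) (opf : Bool → Bool → Bool) :
    ∀ n rest pre, rest.length ≤ n →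
      pvPassA opTok opf (pre ++ rest) pre.length = pre ++ pvRed opTok opf rest := by
  intro n
  induction n with
  | zero =>
    intro rest pre h
    have hr : rest = [] := List.eq_nil_of_length_eq_zero (by omega)
    subst hr
    rw [pvPassA]
    simp [pvRed_nil]
  | succ n ih =>
    intro rest pre h
    match rest with
    | [] =>
      rw [pvPassA]; simp [pvRed_nil]
    | [a] =>
      rw [pvPassA]; simp [pvRed_single]
    | [a, b] =>
      rw [pvPassA]; simp [pvRed_pair]
    | a :: b :: c :: rs =>
      rw [pvPassA]
      have hlen : pre.length + 2 < (pre ++ a :: b :: c :: rs).length := by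
        simp only [List.length_append, List.length_cons]; omega
      rw [dif_pos hlen]
      have hgD : ∀ (k : Nat), (pre ++ a :: b :: c :: rs).getD (pre.length + k) "" =
          (a :: b :: c :: rs).getD k "" := by
        intro k
        rw [List.getD_append_right _ _ _ _ (by omega)]
        congr 1
        omega
      have hg0 : (pre ++ a :: b :: c :: rs).getD pre.length "" = a := by
        have h0 := hgD 0; simp only [Nat.add_zero] at h0; simp [h0]
      have hg1 : (pre ++ a :: b :: c :: rs).getD (pre.length + 1) "" = b := by
        simp [hgD 1]
      have hg2 : (pre ++ a :: b :: c :: rs).getD (pre.length + 2) "" = c := by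
        simp [hgD 2]
      rw [hg0, hg1, hg2]
      by_cases hb : b = opTok
      · rw [if_pos hb]
        have htake : (pre ++ a :: b :: c :: rs).take pre.length = pre :=
          List.take_left' rfl
        have hdrop : (pre ++ a :: b :: c :: rs).drop (pre.length + 3) = rs := by
          have : pre ++ a :: b :: c :: rs = (pre ++ [a, b, c]) ++ rs := by simp
          rw [this]
          exact List.drop_left' (by simp)
        rw [htake, hdrop]
        have hre : pre ++ [pvTok (opf (a == "True") (c == "True"))] ++ rs =
            pre ++ (pvTok (opf (a == "True") (c == "True")) :: rs) := by simp
        rw [hre]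
        rw [ih (pvTok (opf (a == "True") (c == "True")) :: rs) pre
              (by simp only [List.length_cons] at h ⊢; omega)]
        rw [pvRed_cons3, if_pos hb]
      · rw [if_neg hb]
        have hre : pre ++ a :: b :: c :: rs = (pre ++ [a]) ++ (b :: c :: rs) := by simp
        have hlen1 : pre.length + 1 = (pre ++ [a]).length := by simp
        rw [hre, hlen1]
        rw [ih (b :: c :: rs) (pre ++ [a]) (by simp only [List.length_cons] at h ⊢; omega)]
        rw [pvRed_cons3, if_neg hb]
        simp

theorem pvClean_shrink (opTok : String) (u : List String) (a p r : String)
    (h : pvClean opTok (u ++ [a, p])) : pvClean opTok (u ++ [r]) := by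
  intro j hj
  simp only [List.length_append, List.length_cons, List.length_nil] at hj
  have hj1 : j + 1 < u.length := by omega
  rw [List.getD_append _ _ _ _ (by omega)]
  have := h j (by simp only [List.length_append, List.length_cons, List.length_nil]; omega)
  rw [List.getD_append _ _ _ _ (by omega)] at this
  exact this

theorem pvClean_push (opTok : String) (st : List String) (t : String)
    (hc : pvClean opTok st.reverse)
    (hno : st.length < 2 ∨ st.getD 0 "" ≠ opTok) :
    pvClean opTok (st.reverse ++ [t]) := by
  intro j hj
  simp only [List.length_append, List.length_reverse, List.length_cons, List.length_nil] at hj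
  have hj1 : j + 1 < st.length := by omega
  rw [List.getD_append _ _ _ _ (by simpa using hj1)]
  by_cases hlt : j + 2 < st.length
  · exact hc j (by simpa using hlt)
  · -- j + 2 = st.length, the mid is st.head = st.getD 0
    have hje : j + 1 = st.length - 1 := by omega
    have h2 : 2 ≤ st.length := by omega
    rcases hno with hno | hno
    · omega
    · match st, h2 with
      | top :: a :: rest, _ =>
        have : (top :: a :: rest).reverse = (rest.reverse ++ [a]) ++ [top] := by simp
        rw [this, hje]
        rw [List.getD_append_right _ _ _ _ (by simp)]
        simp only [List.length_cons, List.length_append, List.length_reverse,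
          List.length_nil] at *
        have : rest.length + 1 + 1 - 1 - (rest.length + 1) = 0 := by omega
        rw [this]
        simpa using hno

theorem pvFoldB_eq_red (opTok : String) (opf : Bool → Bool → Bool)
    (hop : ∀ b, pvTok b ≠ opTok) :
    ∀ ts st, pvClean opTok st.reverse →
      (List.foldl (pvStepB opTok opf) st ts).reverse = pvRed opTok opf (st.reverse ++ ts) := by
  intro ts
  induction ts with
  | nil =>
    intro st hc
    simp only [List.foldl_nil, List.append_nil]
    exact (pvRed_of_clean _ _ _ hc).symm
  | cons t ts ih =>
    intro st hc
    rw [List.foldl_cons]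
    match st with
    | [] =>
      have := ih [t] (pvClean_short _ _ (by simp))
      simpa [pvStepB] using this
    | [top] =>
      have := ih [t, top] (pvClean_short _ _ (by simp))
      simpa [pvStepB] using this
    | top :: a :: rest =>
      by_cases htop : top = opTok
      · have hstep : pvStepB opTok opf (top :: a :: rest) t =
            pvTok (opf (a == "True") (t == "True")) :: rest := by
          simp [pvStepB, htop]
        rw [hstep]
        have hrev : (top :: a :: rest).reverse = rest.reverse ++ [a, top] := by simp
        have hc2 : pvClean opTok (rest.reverse ++ [a, opTok]) := by
          rw [hrev, htop] at hc; exact hc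
        have hc' : pvClean opTok ((pvTok (opf (a == "True") (t == "True")) :: rest).reverse) := by
          have : (pvTok (opf (a == "True") (t == "True")) :: rest).reverse =
              rest.reverse ++ [pvTok (opf (a == "True") (t == "True"))] := by simp
          rw [this]
          exact pvClean_shrink _ _ a opTok _ hc2
        rw [ih _ hc']
        have hjunc := pvRed_junction opTok opf hop rest.reverse a t ts hc2
        rw [hrev, htop]
        have hl : rest.reverse ++ [a, opTok] ++ t :: ts = rest.reverse ++ a :: opTok :: t :: ts := by
          simp
        rw [hl, hjunc]
        have hr : (pvTok (opf (a == "True") (t == "True")) :: rest).reverse ++ ts =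
            rest.reverse ++ pvTok (opf (a == "True") (t == "True")) :: ts := by simp
        rw [hr]
      · have hstep : pvStepB opTok opf (top :: a :: rest) t = t :: top :: a :: rest := by
          simp [pvStepB, htop]
        rw [hstep]
        have hc' : pvClean opTok ((t :: top :: a :: rest).reverse) := by
          have : (t :: top :: a :: rest).reverse = (top :: a :: rest).reverse ++ [t] := by simp
          rw [this]
          exact pvClean_push opTok (top :: a :: rest) t hc (Or.inr (by simpa using htop))
        rw [ih _ hc']
        congr 1
        simp

theorem pvPassB_eq_passA (opTok : String) (opf : Bool → Bool → Bool)
    (hop : ∀ b, pvTok b ≠ opTok) (tokens : List String) :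
    pvPassB opTok opf tokens = pvPassA opTok opf tokens 0 := by
  have hA := pvPassA_eq_red opTok opf tokens.length tokens [] (le_refl _)
  have hB := pvFoldB_eq_red opTok opf hop tokens [] (pvClean_short _ _ (by simp))
  simp only [List.nil_append, List.length_nil, List.reverse_nil] at hA hB
  rw [pvPassB, hB, hA]

-- ===== VERDICT (by name: the statement is the Claim_ definition above) =====
theorem calculate_spec : Claim_equal_calculate := by
  intro expr values _ _
  have h1 := pvPassB_eq_passA "&" (fun a b => a && b) (by intro b; cases b <;> decide)
  have h2 := pvPassB_eq_passA "|" (fun a b => a || b) (by intro b; cases b <;> decide)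
  unfold Spec_calculate calculate calculate_alt
  simp only [pvSubstA_eq_map, h1, h2]
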